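-- pv_equiv track=rewrite | github.com/soleribone/UTN_Projects | TP2/r8_r12.py | validar_cod_identificacion
-- ===== SOURCE A (Python) =====
-- def validar_cod_identificacion(destinatario):
--     estado = False
--     for c in destinatario:
--         if "A" <= c <= "Z" or c in "0123456789" or c == " ":
--             estado = True
--         elif estado  and c in "-_" or c == " ":
--             estado = True
--         else:
--             estado = False
--             break
--
--     return estado
-- ===== SOURCE B (Python) =====
-- import re
--
-- def validar_cod_identificacion(destinatario):
--     return bool(re.fullmatch(r"[A-Z0-9 ][A-Z0-9 _-]*", destinatario))
-- ===== Notes on version B (the rewrite author's own statement) =====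
-- stated objective: idiomatic
-- what changed: Replaced the stateful loop with breaks by a single regular-expression fullmatch ('[A-Z0-9 ][A-Z0-9 _-]*') characterising the accepted strings.
import Mathlib
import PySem

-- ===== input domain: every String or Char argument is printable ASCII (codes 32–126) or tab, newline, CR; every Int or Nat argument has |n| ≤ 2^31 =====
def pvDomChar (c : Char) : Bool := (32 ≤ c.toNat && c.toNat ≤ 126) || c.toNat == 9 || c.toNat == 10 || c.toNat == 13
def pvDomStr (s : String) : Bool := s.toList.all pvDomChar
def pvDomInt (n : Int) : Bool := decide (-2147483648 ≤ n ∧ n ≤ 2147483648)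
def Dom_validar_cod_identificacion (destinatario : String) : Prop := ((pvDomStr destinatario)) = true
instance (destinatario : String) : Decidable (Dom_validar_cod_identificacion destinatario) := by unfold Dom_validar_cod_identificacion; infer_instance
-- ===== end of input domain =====

-- B replaces A's stateful loop-with-break by a single regex-style full match
-- ("[A-Z0-9 ][A-Z0-9 _-]*"): first char in one class, all remaining chars in a wider class.

-- ===== PORT A =====
-- loop with early break: returns `estado` when the string is exhausted, false on break
def pvLoopA : List Char → Bool → Bool
  | [], estado => estado
  | c :: cs, estado =>
      if ('A' ≤ c && c ≤ 'Z') || (['0','1','2','3','4','5','6','7','8','9'].contains c) || (c == ' ') then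
        pvLoopA cs true
      else if (estado && (['-','_'].contains c)) || (c == ' ') then
        pvLoopA cs true
      else
        false

def validar_cod_identificacion (destinatario : String) : Bool :=
  pvLoopA destinatario.toList false

-- ===== PORT B =====
-- character class [A-Z0-9 ]
def pvCls1 (c : Char) : Bool := ('A' ≤ c && c ≤ 'Z') || ('0' ≤ c && c ≤ '9') || (c == ' ')
-- character class [A-Z0-9 _-]
def pvCls2 (c : Char) : Bool := pvCls1 c || (c == '_') || (c == '-')

-- fullmatch of [A-Z0-9 ][A-Z0-9 _-]* coerced to bool
def validar_cod_identificacion_alt (destinatario : String) : Bool :=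
  match destinatario.toList with
  | [] => false
  | c :: cs => pvCls1 c && cs.all pvCls2

-- ===== PRECONDITION & SPEC =====
def Spec_validar_cod_identificacion (destinatario : String) (out : Bool) : Prop := out = validar_cod_identificacion_alt destinatario
instance (destinatario : String) (out : Bool) : Decidable (Spec_validar_cod_identificacion destinatario out) := by unfold Spec_validar_cod_identificacion; infer_instance

-- ===== CLAIM (what is proved, stated in full; the proofs are below) =====
def Claim_equal_validar_cod_identificacion : Prop := ∀ (destinatario : String), Dom_validar_cod_identificacion destinatario → Spec_validar_cod_identificacion destinatario (validar_cod_identificacion destinatario)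

-- ===== LEMMAS AND PROOFS =====

-- A's first-branch condition coincides with B's class [A-Z0-9 ]
theorem pvCondA_eq (c : Char) :
    (('A' ≤ c && c ≤ 'Z') || (['0','1','2','3','4','5','6','7','8','9'].contains c) || (c == ' ')) = pvCls1 c := by
  rw [Bool.eq_iff_iff]
  simp only [pvCls1, Bool.or_eq_true, Bool.and_eq_true, List.contains_eq_mem, List.mem_cons,
    List.not_mem_nil, or_false, decide_eq_true_eq, beq_iff_eq, Char.le_def,
    UInt32.le_iff_toNat_le, Char.ext_iff, UInt32.ext_iff]
  have e0 : 'A'.val.toNat = 65 := rfl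
  have e1 : 'Z'.val.toNat = 90 := rfl
  have e2 : '0'.val.toNat = 48 := rfl
  have e3 : '9'.val.toNat = 57 := rfl
  have e4 : '1'.val.toNat = 49 := rfl
  have e5 : '2'.val.toNat = 50 := rfl
  have e6 : '3'.val.toNat = 51 := rfl
  have e7 : '4'.val.toNat = 52 := rfl
  have e8 : '5'.val.toNat = 53 := rfl
  have e9 : '6'.val.toNat = 54 := rfl
  have ea : '7'.val.toNat = 55 := rfl
  have eb : '8'.val.toNat = 56 := rfl
  rw [e0, e1, e2, e3, e4, e5, e6, e7, e8, e9, ea, eb]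
  omega

-- A's dash/underscore membership coincides with B's two equality tests
theorem pvDash_eq (c : Char) :
    (['-','_'].contains c) = ((c == '_') || (c == '-')) := by
  rw [Bool.eq_iff_iff]
  simp only [List.contains_eq_mem, List.mem_cons, List.not_mem_nil, or_false,
    decide_eq_true_eq, Bool.or_eq_true, beq_iff_eq]
  tauto

-- space is in class 1, so ¬pvCls1 c rules out c = ' '
theorem pvSpace_cls1 (c : Char) (h : pvCls1 c = false) : (c == ' ') = false := by
  cases hb : (c == ' ')
  · rfl
  · simp only [beq_iff_eq] at hb
    subst hb
    exact absurd h (by decide)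

-- once estado is true, A's loop accepts exactly when every remaining char is in [A-Z0-9 _-]
theorem pvLoopA_true (cs : List Char) : pvLoopA cs true = cs.all pvCls2 := by
  induction cs with
  | nil => rfl
  | cons c cs ih =>
    rw [List.all_cons, ← ih]
    show (if _ then _ else _) = _
    rw [pvCondA_eq]
    by_cases h1 : pvCls1 c = true
    · simp [h1, pvCls2]
    · rw [Bool.not_eq_true] at h1
      rw [h1]
      simp only [Bool.true_and, pvDash_eq, pvSpace_cls1 c h1, Bool.or_false]
      by_cases h2 : ((c == '_') || (c == '-')) = true
      · simp [pvCls2, h1, h2]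
      · rw [Bool.not_eq_true] at h2
        simp [pvCls2, h1, h2]

-- ===== VERDICT (by name: the statement is the Claim_ definition above) =====
theorem validar_cod_identificacion_spec : Claim_equal_validar_cod_identificacion := by
  intro s _
  unfold Spec_validar_cod_identificacion validar_cod_identificacion validar_cod_identificacion_alt
  cases hs : s.toList with
  | nil => rfl
  | cons c cs =>
    show (if _ then _ else _) = _
    rw [pvCondA_eq]
    by_cases h1 : pvCls1 c = true
    · simp [h1, pvLoopA_true]
    · rw [Bool.not_eq_true] at h1
      rw [h1]
      simp [pvSpace_cls1 c h1, h1]
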